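-- pv_equiv track=rewrite | github.com/miliar/Code_Jam_Webscraper | solutions_python/solutions_year17_round1_nr1/296.py | solve_first
-- ===== SOURCE A (Python) =====
-- def solve_line(l):
--     t = solve_line_first(l)
--     return solve_line_first(t[::-1])[::-1]
--
-- def solve_line_first(l):
--     prev = '?'
--     s = ''
--     for c in l:
--         if c == '?':
--             s += prev
--         else:
--             s += c
--             prev = c
--     return s
--
-- def solve_first(lines, c):
--     res = []
--     q = '?' * c
--     prev = '?' * c
--     for line in lines:
--         if line == q:
--             res.append(prev)
--         else:
--             prev = solve_line(line)
--             res.append(prev)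
--     return res
-- ===== SOURCE B (Python) =====
-- def solve_line(l):
--     last = None
--     lead = 0
--     out = ''
--     for ch in l:
--         if ch == '?':
--             if last is None:
--                 lead += 1
--             else:
--                 out += last
--         else:
--             if last is None:
--                 out += ch * lead
--             out += ch
--             last = ch
--     if last is None:
--         return '?' * lead
--     return out
--
-- def solve_first(lines, c):
--     res = []
--     q = '?' * c
--     prev = '?' * c
--     for line in lines:
--         if line == q:
--             res.append(prev)
--         else:
--             prev = solve_line(line)
--             res.append(prev)
--     return res
-- ===== Notes on version B (the rewrite author's own statement) =====
-- stated objective: faster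
-- what changed: Per line, A runs a forward fill, reverses, runs the forward fill again and reverses back; B fills each line in a single left-to-right pass that buffers the leading run of '?' and flushes it with the first letter (outer prev-reuse loop kept).
import Mathlib
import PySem

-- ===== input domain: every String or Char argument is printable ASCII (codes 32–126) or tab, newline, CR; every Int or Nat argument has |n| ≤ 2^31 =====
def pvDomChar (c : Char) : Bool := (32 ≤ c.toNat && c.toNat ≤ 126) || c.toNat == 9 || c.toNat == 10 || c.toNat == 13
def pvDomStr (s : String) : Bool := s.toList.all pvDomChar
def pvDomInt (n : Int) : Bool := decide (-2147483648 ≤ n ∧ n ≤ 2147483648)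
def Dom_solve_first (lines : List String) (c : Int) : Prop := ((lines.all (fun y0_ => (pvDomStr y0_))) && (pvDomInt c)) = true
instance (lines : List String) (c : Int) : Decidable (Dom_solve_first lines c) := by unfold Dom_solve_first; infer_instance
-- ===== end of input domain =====

-- B replaces A's forward-fill / reverse / forward-fill / reverse per line by a single
-- left-to-right pass that buffers the leading '?' run; same outer prev-reuse logic (objective: simpler).

-- ===== PORT A =====
-- loop body of solve_line_first: state = (prev, s)
def pvA_step (st : Char × List Char) (c : Char) : Char × List Char :=
  if c = '?' then (st.1, st.2 ++ [st.1]) else (c, st.2 ++ [c])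

def solve_line_first (l : String) : String :=
  -- prev = '?'; s = ''; for c in l: …; return s
  String.ofList (l.toList.foldl pvA_step ('?', [])).2

def solve_line (l : String) : String :=
  let t := solve_line_first l
  -- s[::-1] is list reverse (PySem.Str.slice?_none_none_neg_one)
  String.ofList (solve_line_first (String.ofList t.toList.reverse)).toList.reverse

-- loop body of solve_first: state = (prev, res)
def pvA_outer (q : String) (st : String × List String) (line : String) : String × List String :=
  if line = q then (st.1, st.2 ++ [st.1])
  else let p := solve_line line; (p, st.2 ++ [p])

def solve_first (lines : List String) (c : Int) : List String :=
  -- '?' * c  (PySem.List.pyRepeat_singleton: = replicate c.toNat '?')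
  let q := String.ofList (List.replicate c.toNat '?')
  ((lines.foldl (pvA_outer q) (q, [])).2)

-- ===== PORT B =====
-- loop body of B's solve_line: state = (last, lead, out)
def pvB_step (st : Option Char × Int × List Char) (ch : Char) : Option Char × Int × List Char :=
  if ch = '?' then
    match st.1 with
    | none   => (none, st.2.1 + 1, st.2.2)
    | some p => (some p, st.2.1, st.2.2 ++ [p])
  else
    match st.1 with
    | none   => (some ch, st.2.1, st.2.2 ++ List.replicate st.2.1.toNat ch ++ [ch])
    | some _ => (some ch, st.2.1, st.2.2 ++ [ch])

def solve_line_alt (l : String) : String :=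
  let st := l.toList.foldl pvB_step (none, 0, [])
  match st.1 with
  | none   => String.ofList (List.replicate st.2.1.toNat '?')   -- '?' * lead
  | some _ => String.ofList st.2.2

def pvB_outer (q : String) (st : String × List String) (line : String) : String × List String :=
  if line = q then (st.1, st.2 ++ [st.1])
  else let p := solve_line_alt line; (p, st.2 ++ [p])

def solve_first_alt (lines : List String) (c : Int) : List String :=
  let q := String.ofList (List.replicate c.toNat '?')
  ((lines.foldl (pvB_outer q) (q, [])).2)

-- ===== PRECONDITION & SPEC =====
def Spec_solve_first (lines : List String) (c : Int) (out : List String) : Prop := out = solve_first_alt lines c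
instance (lines : List String) (c : Int) (out : List String) : Decidable (Spec_solve_first lines c out) := by unfold Spec_solve_first; infer_instance

-- ===== CLAIM (what is proved, stated in full; the proofs are below) =====
def Claim_equal_solve_first : Prop := ∀ (lines : List String) (c : Int), Dom_solve_first lines c → Spec_solve_first lines c (solve_first lines c)

-- ===== LEMMAS AND PROOFS =====

-- recursive characterisation of A's forward pass: (final prev, output)
def fillP : Char → List Char → Char × List Char
  | p, [] => (p, [])
  | p, c :: t => if c = '?' then ((fillP p t).1, p :: (fillP p t).2)
                 else ((fillP c t).1, c :: (fillP c t).2)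

theorem foldlA_eq_fillP (l : List Char) (p : Char) (acc : List Char) :
    l.foldl pvA_step (p, acc) = ((fillP p l).1, acc ++ (fillP p l).2) := by
  induction l generalizing p acc with
  | nil => simp [fillP]
  | cons c t ih =>
    by_cases h : c = '?' <;> simp [pvA_step, fillP, h, ih]

theorem fillP_replicate (p : Char) (k : Nat) :
    fillP p (List.replicate k '?') = (p, List.replicate k p) := by
  induction k with
  | zero => simp [fillP]
  | succ k ih => simp [List.replicate_succ, fillP, ih]

theorem fillP_append (p : Char) (a b : List Char) :
    fillP p (a ++ b) = ((fillP (fillP p a).1 b).1, (fillP p a).2 ++ (fillP (fillP p a).1 b).2) := by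
  induction a generalizing p with
  | nil => simp [fillP]
  | cons c t ih =>
    by_cases h : c = '?' <;> simp [fillP, h, ih]

theorem fillP_no_q (p : Char) (l : List Char) (h : ∀ x ∈ l, x ≠ '?') :
    fillP p l = (l.getLastD p, l) := by
  induction l generalizing p with
  | nil => simp [fillP]
  | cons c t ih =>
    have hc : c ≠ '?' := h c (by simp)
    simp only [fillP, if_neg hc, ih _ (fun x hx => h x (by simp [hx]))]
    cases t with
    | nil => simp
    | cons d u =>
      cases hgl : (d :: u).getLast? with
      | none => exact absurd hgl (by simp)
      | some y => simp [hgl]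

theorem fillP_out_no_q (p : Char) (l : List Char) (hp : p ≠ '?') :
    ∀ x ∈ (fillP p l).2, x ≠ '?' := by
  induction l generalizing p with
  | nil => simp [fillP]
  | cons c t ih =>
    intro x hx
    by_cases h : c = '?'
    · subst h
      simp only [fillP, if_pos] at hx
      rcases List.mem_cons.mp hx with rfl | hx
      · exact hp
      · exact ih p hp x hx
    · simp only [fillP, if_neg h] at hx
      rcases List.mem_cons.mp hx with rfl | hx
      · exact h
      · exact ih c h x hx

theorem foldlB_some (t : List Char) (p : Char) (lead : Int) (acc : List Char) :
    t.foldl pvB_step (some p, lead, acc) = (some (fillP p t).1, lead, acc ++ (fillP p t).2) := by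
  induction t generalizing p acc with
  | nil => simp [fillP]
  | cons c t ih =>
    by_cases h : c = '?' <;> simp [pvB_step, fillP, h, ih]

theorem foldlB_reps (k : Nat) (lead : Int) (acc : List Char) :
    (List.replicate k '?').foldl pvB_step (none, lead, acc) = (none, lead + k, acc) := by
  induction k generalizing lead with
  | zero => simp
  | succ k ih => simp [List.replicate_succ, pvB_step, ih]; ring

-- every char list is a run of '?' followed by nothing or a non-'?' char
theorem split_qs (l : List Char) :
    (∃ k, l = List.replicate k '?') ∨
    (∃ k ch t, l = List.replicate k '?' ++ ch :: t ∧ ch ≠ '?') := by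
  induction l with
  | nil => exact Or.inl ⟨0, rfl⟩
  | cons c t ih =>
    by_cases h : c = '?'
    · subst h
      rcases ih with ⟨k, rfl⟩ | ⟨k, ch, u, rfl, hch⟩
      · exact Or.inl ⟨k + 1, by simp [List.replicate_succ]⟩
      · exact Or.inr ⟨k + 1, ch, u, by simp [List.replicate_succ], hch⟩
    · exact Or.inr ⟨0, c, t, by simp, h⟩

theorem solve_line_chars (l : String) :
    solve_line l = String.ofList ((fillP '?' ((fillP '?' l.toList).2.reverse)).2.reverse) := by
  simp only [solve_line, solve_line_first, foldlA_eq_fillP, String.toList_ofList,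
    List.nil_append]

theorem line_eq (l : String) : solve_line l = solve_line_alt l := by
  rw [solve_line_chars]
  rcases split_qs l.toList with ⟨k, hk⟩ | ⟨k, ch, t, hk, hch⟩
  · -- all-'?' line: both sides return the line itself
    simp only [solve_line_alt, hk, foldlB_reps, fillP_replicate, List.reverse_replicate]
    simp
  · have hu := fillP_out_no_q ch t hch
    set u := (fillP ch t).2 with hu_def
    have h1 : fillP '?' (ch :: t) = ((fillP ch t).1, ch :: u) := by
      simp [fillP, hch, hu_def]
    -- A's two passes, computed on the char list
    have hA1 : (fillP '?' l.toList).2 = List.replicate k '?' ++ ch :: u := by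
      rw [hk, fillP_append, fillP_replicate, h1]
    have hrev : (List.replicate k '?' ++ ch :: u).reverse
        = u.reverse ++ ch :: List.replicate k '?' := by
      simp [List.reverse_replicate]
    have hA2 : (fillP '?' ((fillP '?' l.toList).2.reverse)).2
        = u.reverse ++ ch :: List.replicate k ch := by
      rw [hA1, hrev, fillP_append,
        fillP_no_q '?' u.reverse (by simpa using fun x hx => hu x hx)]
      simp [fillP, hch, fillP_replicate]
    -- B's single pass
    have hB : l.toList.foldl pvB_step (none, 0, [])
        = (some (fillP ch t).1, (0 : Int) + (k : Int), List.replicate k ch ++ [ch] ++ u) := by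
      rw [hk, List.foldl_append, foldlB_reps, List.foldl_cons]
      have h3 : pvB_step (none, (0 : Int) + (k : Int), []) ch
          = (some ch, (0 : Int) + (k : Int), [] ++ List.replicate k ch ++ [ch]) := by
        simp [pvB_step, hch]
      rw [h3, foldlB_some]
      simp [hu_def]
    simp only [solve_line_alt, hB, hA2]
    simp [List.reverse_replicate]

theorem outer_eq (q : String) : pvA_outer q = pvB_outer q := by
  funext st line
  simp [pvA_outer, pvB_outer, line_eq]

-- ===== VERDICT (by name: the statement is the Claim_ definition above) =====
theorem solve_first_spec : Claim_equal_solve_first := by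
  intro lines c _
  unfold Spec_solve_first
  simp only [solve_first, solve_first_alt, outer_eq]
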